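-- pv_equiv track=rewrite | github.com/rohanbansal12/ml-stuff | gpt/bpe.py | _merge_pair_in_corpus
-- ===== SOURCE A (Python) =====
-- from typing import List, Dict, Tuple
--
-- def _merge_pair_in_corpus(
--
--     corpus_tokens: List[List[str]],
--     pair: Tuple[str, str],
--     new_token: str,
-- ) -> List[List[str]]:
--     """
--     Replace all occurrences of 'pair' with 'new_token' in corpus_tokens.
--     Return a new corpus_tokens list.
--     """
--     new_corpus_tokens = []
--     for sent in corpus_tokens:
--         cur = []
--         i = 0
--         while i < len(sent) - 1:
--             if (sent[i], sent[i+1]) == pair: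
--                 cur.append(new_token)
--                 i += 2
--             else:
--                 cur.append(sent[i])
--                 i += 1
--         if i == len(sent) - 1: cur.append(sent[-1])
--         new_corpus_tokens.append(cur)
--     return new_corpus_tokens
-- ===== SOURCE B (Python) =====
-- def _merge_pair_in_corpus(corpus_tokens, pair, new_token):
--     new_corpus_tokens = []
--     for sent in corpus_tokens:
--         cur = []
--         buf = None
--         has_prev = False
--         for tok in sent:
--             if has_prev and (buf, tok) == pair:
--                 cur.append(new_token)
--                 has_prev = False
--             else:
--                 if has_prev:
--                     cur.append(buf)
--                 buf = tok
--                 has_prev = True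
--         if has_prev:
--             cur.append(buf)
--         new_corpus_tokens.append(cur)
--     return new_corpus_tokens
-- ===== Notes on version B (the rewrite author's own statement) =====
-- stated objective: alternative
-- what changed: The index-based while loop with i+=1/i+=2 skipping and the trailing 'if i == len-1' flush is replaced by a streaming one-slot-buffer state machine over the tokens (buffer + has_prev flag, flushed after the loop).
import Mathlib
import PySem

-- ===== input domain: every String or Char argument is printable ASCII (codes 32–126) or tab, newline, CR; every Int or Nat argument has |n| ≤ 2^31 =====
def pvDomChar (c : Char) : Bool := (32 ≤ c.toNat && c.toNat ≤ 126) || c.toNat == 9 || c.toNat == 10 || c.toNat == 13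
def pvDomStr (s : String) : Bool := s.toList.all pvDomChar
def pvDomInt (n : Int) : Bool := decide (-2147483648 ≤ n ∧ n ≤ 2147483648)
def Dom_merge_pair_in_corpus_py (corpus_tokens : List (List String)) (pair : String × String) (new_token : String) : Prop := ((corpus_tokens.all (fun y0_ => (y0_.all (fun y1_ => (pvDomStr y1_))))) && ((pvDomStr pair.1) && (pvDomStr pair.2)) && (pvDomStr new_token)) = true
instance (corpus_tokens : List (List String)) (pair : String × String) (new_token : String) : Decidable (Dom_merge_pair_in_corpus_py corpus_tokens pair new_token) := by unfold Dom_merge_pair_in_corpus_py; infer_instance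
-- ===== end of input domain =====

-- B: streaming one-slot-buffer state machine per sentence instead of A's index-based while loop (objective: alternative; same cost).
-- A mutates nothing; equivalence is about the return value.

-- ===== PORT A =====
-- A's inner while loop over index i; i < len(sent)-1 (Python int arithmetic) equals i+1 < sent.length
-- for Nat i, and the trailing 'if i == len(sent)-1: cur.append(sent[-1])' equals i+1 = sent.length.
-- sent.getD i "" is exact here: every index read is in range (i+1 < length on the read branch,
-- and sent[-1] is read only when length = i+1 ≥ 1).
def pyAInner (pair : String × String) (new_token : String) (sent : List String) (i : Nat) (cur : List String) : List String :=
  if i + 1 < sent.length then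
    if (sent.getD i "", sent.getD (i+1) "") = pair then
      pyAInner pair new_token sent (i+2) (cur ++ [new_token])
    else
      pyAInner pair new_token sent (i+1) (cur ++ [sent.getD i ""])
  else if i + 1 = sent.length then cur ++ [sent.getD (sent.length - 1) ""]
  else cur
termination_by sent.length - i
decreasing_by all_goals omega

def merge_pair_in_corpus_py (corpus_tokens : List (List String)) (pair : String × String) (new_token : String) : List (List String) :=
  corpus_tokens.map (fun sent => pyAInner pair new_token sent 0 [])

-- ===== PORT B =====
-- B's inner for loop: one-slot buffer buf with has_prev flag, flushed after the loop.
def pyBInner (pair : String × String) (new_token : String) (sent : List String) (buf : String) (has_prev : Bool) (cur : List String) : List String :=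
  match sent with
  | [] => if has_prev then cur ++ [buf] else cur
  | tok :: rest =>
    if has_prev ∧ (buf, tok) = pair then
      pyBInner pair new_token rest buf false (cur ++ [new_token])
    else
      pyBInner pair new_token rest tok true (if has_prev then cur ++ [buf] else cur)

def merge_pair_in_corpus_py_alt (corpus_tokens : List (List String)) (pair : String × String) (new_token : String) : List (List String) :=
  corpus_tokens.map (fun sent => pyBInner pair new_token sent "" false [])

-- ===== PRECONDITION & SPEC =====
def Spec_merge_pair_in_corpus_py (corpus_tokens : List (List String)) (pair : String × String) (new_token : String) (out : List (List String)) : Prop := out = merge_pair_in_corpus_py_alt corpus_tokens pair new_token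
instance (corpus_tokens : List (List String)) (pair : String × String) (new_token : String) (out : List (List String)) : Decidable (Spec_merge_pair_in_corpus_py corpus_tokens pair new_token out) := by unfold Spec_merge_pair_in_corpus_py; infer_instance

-- ===== CLAIM (what is proved, stated in full; the proofs are below) =====
def Claim_equal_merge_pair_in_corpus_py : Prop := ∀ (corpus_tokens : List (List String)) (pair : String × String) (new_token : String), Dom_merge_pair_in_corpus_py corpus_tokens pair new_token → Spec_merge_pair_in_corpus_py corpus_tokens pair new_token (merge_pair_in_corpus_py corpus_tokens pair new_token)

-- ===== LEMMAS AND PROOFS =====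

-- ===== VERDICT (by name: the statement is the Claim_ definition above) =====
-- common characterisation: greedy non-overlapping replacement, by structural recursion
def mergeSpec (pair : String × String) (new_token : String) : List String → List String
  | a :: b :: rest =>
    if (a, b) = pair then new_token :: mergeSpec pair new_token rest
    else a :: mergeSpec pair new_token (b :: rest)
  | [a] => [a]
  | [] => []

theorem pyAInner_eq (pair : String × String) (nt : String) (sent : List String) :
    ∀ i cur, pyAInner pair nt sent i cur = cur ++ mergeSpec pair nt (sent.drop i) := by
  intro i cur
  fun_induction pyAInner pair nt sent i cur with
  | case1 i cur hi hp ih =>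
    have h1 : i < sent.length := by omega
    have h2 : i + 1 < sent.length := hi
    rw [List.drop_eq_getElem_cons h1, List.drop_eq_getElem_cons h2, ih]
    rw [List.getD_eq_getElem sent "" h1, List.getD_eq_getElem sent "" h2] at hp
    simp [mergeSpec, hp]
  | case2 i cur hi hp ih =>
    have h1 : i < sent.length := by omega
    have h2 : i + 1 < sent.length := hi
    rw [ih]
    rw [List.getD_eq_getElem sent "" h1, List.getD_eq_getElem sent "" h2] at hp
    conv_rhs => rw [List.drop_eq_getElem_cons h1, List.drop_eq_getElem_cons h2]
    simp only [mergeSpec, if_neg hp]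
    rw [← List.drop_eq_getElem_cons h2]
    simp [List.getElem?_eq_getElem h1]
  | case3 i cur hi he =>
    have h1 : i < sent.length := by omega
    rw [List.drop_eq_getElem_cons h1]
    have : sent.drop (i+1) = [] := by simp; omega
    rw [this]
    have hl : sent.length - 1 = i := by omega
    simp [mergeSpec, hl, List.getElem?_eq_getElem h1]
  | case4 i cur hi he =>
    have : sent.drop i = [] := by simp; omega
    simp [this, mergeSpec]

theorem pyBInner_eq (pair : String × String) (nt : String) :
    ∀ (sent : List String) (buf : String) (cur : List String),
      pyBInner pair nt sent buf true cur = cur ++ mergeSpec pair nt (buf :: sent) ∧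
      pyBInner pair nt sent buf false cur = cur ++ mergeSpec pair nt sent := by
  intro sent
  induction sent with
  | nil => intro buf cur; simp [pyBInner, mergeSpec]
  | cons tok rest ih =>
    intro buf cur
    constructor
    · by_cases h : (buf, tok) = pair
      · rw [pyBInner, if_pos ⟨rfl, h⟩, (ih buf (cur ++ [nt])).2]
        simp [mergeSpec, h]
      · rw [pyBInner, if_neg (by simp [h]), if_pos rfl, (ih tok (cur ++ [buf])).1]
        simp [mergeSpec, h]
    · rw [pyBInner, if_neg (by simp), if_neg (by simp), (ih tok cur).1]

theorem merge_pair_in_corpus_py_spec : Claim_equal_merge_pair_in_corpus_py := by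
  intro corpus pair nt _
  unfold Spec_merge_pair_in_corpus_py merge_pair_in_corpus_py merge_pair_in_corpus_py_alt
  refine List.map_congr_left (fun sent _ => ?_)
  rw [pyAInner_eq, (pyBInner_eq pair nt sent "" []).2]
  simp
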